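-- pv_equiv track=rewrite | github.com/NotRobiin/challenges | string_like_square.py | create_square
-- ===== SOURCE A (Python) =====
-- def create_square(size):
--     if size < 1:
--         return ""
--
--     if size == 1:
--         return "#"
--
--     border = "#" * size
--     new_size = size - 2
--     output = border + "\n"
--
--     for _ in range(new_size):
--         output += "#" + (" " * new_size) + "#" + "\n"
--
--     output += border
--
--     return output
-- ===== SOURCE B (Python) =====
-- def create_square(size):
--     # Paint a flat byte canvas: start from a solid block of '#', stride-assign
--     # the newline column, then blank out each interior row's middle.
--     if size < 1:
--         return ""
--     w = size + 1  # row width including the newline column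
--     canvas = bytearray(b'#') * (size * w - 1)
--     canvas[size::w] = b'\n' * (size - 1)
--     blank = b' ' * (size - 2)
--     for r in range(1, size - 1):
--         canvas[r * w + 1 : r * w + 1 + (size - 2)] = blank
--     return canvas.decode()
-- ===== Notes on version B (the rewrite author's own statement) =====
-- stated objective: alternative
-- what changed: B paints a flat byte canvas: it allocates one solid block of '#' bytes, stride-assigns the newline column at positions size, size+(size+1), ..., and blanks each interior row's middle with a slice assignment, instead of A's special-cased row-by-row string concatenation.
import Mathlib
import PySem

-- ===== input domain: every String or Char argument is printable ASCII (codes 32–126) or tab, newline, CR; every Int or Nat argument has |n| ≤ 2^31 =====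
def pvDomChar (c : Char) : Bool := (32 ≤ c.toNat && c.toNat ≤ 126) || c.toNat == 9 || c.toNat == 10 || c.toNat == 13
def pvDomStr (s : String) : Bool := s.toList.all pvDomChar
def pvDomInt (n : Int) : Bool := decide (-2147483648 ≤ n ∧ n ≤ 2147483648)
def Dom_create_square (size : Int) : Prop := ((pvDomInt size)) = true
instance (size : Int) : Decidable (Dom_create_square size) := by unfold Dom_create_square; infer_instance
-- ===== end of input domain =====

-- B paints a flat byte canvas (solid '#' block, strided newline column, blanked row
-- interiors) instead of A's special-cased row-by-row concatenation (objective: alternative).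

-- ===== PORT A =====
-- strings are ported on List Char ('#'*n = List.replicate, += = ++) and wrapped by String.ofList once
def create_square (size : Int) : String :=
  if size < 1 then "" else
  if size = 1 then "#" else
  let border : List Char := List.replicate size.toNat '#'
  let new_size : Int := size - 2
  let output : List Char := border ++ ['\n']
  let output := (PySem.List.pyRange 0 new_size 1).foldl
      (fun acc _ => acc ++ ('#' :: List.replicate new_size.toNat ' ' ++ ['#', '\n'])) output
  String.ofList (output ++ border)

-- ===== PORT B =====
def create_square_alt (size : Int) : String :=
  if size < 1 then "" else
  let w : Int := size + 1
  let canvas : List Char := List.replicate (size * w - 1).toNat '#'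
  -- canvas[size::w] = '\n' * (size - 1): a strided constant slice-assignment,
  -- ported exactly as its index writes size + t*w for t = 0 .. size-2
  let canvas := (PySem.List.pyRange 0 (size - 1) 1).foldl
      (fun b t => b.set (size + t * w).toNat '\n') canvas
  -- canvas[r*w+1 : r*w+1+(size-2)] = blank (= ' ' * (size-2)): a contiguous constant
  -- slice-assignment, ported exactly as its index writes r*w+1 .. r*w+size-2
  let canvas := (PySem.List.pyRange 1 (size - 1) 1).foldl
      (fun b r => (PySem.List.pyRange (r * w + 1) (r * w + 1 + (size - 2)) 1).foldl
          (fun b2 c => b2.set c.toNat ' ') b) canvas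
  String.ofList canvas

-- ===== PRECONDITION & SPEC =====
def Spec_create_square (size : Int) (out : String) : Prop := out = create_square_alt size
instance (size : Int) (out : String) : Decidable (Spec_create_square size out) := by unfold Spec_create_square; infer_instance

-- ===== CLAIM (what is proved, stated in full; the proofs are below) =====
def Claim_equal_create_square : Prop := ∀ (size : Int), Dom_create_square size → Spec_create_square size (create_square size)

-- ===== LEMMAS AND PROOFS =====

-- B's per-index character function (definitionally the lambda inside create_square_alt)
def pvF (s k : Int) : Char :=
  if PySem.Int.mod k (s + 1) = s then '\n'
  else if PySem.Int.floordiv k (s + 1) = 0 ∨ PySem.Int.floordiv k (s + 1) = s - 1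
         ∨ PySem.Int.mod k (s + 1) = 0 ∨ PySem.Int.mod k (s + 1) = s - 1 then '#'
  else ' '

-- a fold of constant index-writes, read back at position i
theorem pv_foldl_set_getElem? {alpha : Type} (f : Int → Nat) (v : alpha) (l : List Int) :
    ∀ (b : List alpha) (i : Nat),
    (l.foldl (fun b x => b.set (f x) v) b)[i]?
      = if (∃ x ∈ l, f x = i) ∧ i < b.length then some v else b[i]? := by
  induction l with
  | nil => intro b i; simp
  | cons a t ih =>
      intro b i
      rw [List.foldl_cons, ih, List.length_set, List.getElem?_set]
      by_cases hlen : i < b.length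
      · by_cases hm : ∃ x ∈ t, f x = i
        · rw [if_pos (⟨hm, hlen⟩ : (∃ x ∈ t, f x = i) ∧ i < b.length),
              if_pos (⟨⟨hm.choose, List.mem_cons_of_mem a hm.choose_spec.1, hm.choose_spec.2⟩,
                hlen⟩ : (∃ x ∈ a :: t, f x = i) ∧ i < b.length)]
        · rw [if_neg (fun h => hm h.1 : ¬((∃ x ∈ t, f x = i) ∧ i < b.length))]
          by_cases ha : f a = i
          · rw [if_pos ha, ha, if_pos hlen,
                if_pos (⟨⟨a, List.mem_cons_self, ha⟩, hlen⟩ :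
                  (∃ x ∈ a :: t, f x = i) ∧ i < b.length)]
          · rw [if_neg ha, if_neg (show ¬((∃ x ∈ a :: t, f x = i) ∧ i < b.length) from by
              rintro ⟨⟨x, hx, hfx⟩, -⟩
              rcases List.mem_cons.mp hx with rfl | hx
              · exact ha hfx
              · exact hm ⟨x, hx, hfx⟩)]
      · rw [if_neg (fun h => hlen h.2 : ¬((∃ x ∈ t, f x = i) ∧ i < b.length)),
            if_neg (fun h => hlen h.2 : ¬((∃ x ∈ a :: t, f x = i) ∧ i < b.length))]
        by_cases ha : f a = i
        · rw [if_pos ha, ha, if_neg hlen]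
          exact (List.getElem?_eq_none (by omega)).symm
        · rw [if_neg ha]

theorem pv_foldl_set_length {alpha : Type} (f : Int → Nat) (v : alpha) (l : List Int) :
    ∀ (b : List alpha), (l.foldl (fun b x => b.set (f x) v) b).length = b.length := by
  induction l with
  | nil => intro b; rfl
  | cons a t ih => intro b; rw [List.foldl_cons, ih, List.length_set]

theorem pv_fdm (r i w : Int) (_hr : 0 ≤ r) (hi : 0 ≤ i) (hiw : i < w) :
    PySem.Int.floordiv (r * w + i) w = r ∧ PySem.Int.mod (r * w + i) w = i := by
  have hw : 0 < w := lt_of_le_of_lt hi hiw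
  have hd : PySem.Int.floordiv (r * w + i) w = r := by
    rw [PySem.Int.floordiv_eq_iff_of_pos (hb := hw)]
    constructor <;> nlinarith
  refine ⟨hd, ?_⟩
  have := PySem.Int.floordiv_mul_add_mod (r * w + i) w
  rw [hd] at this
  linarith

-- value of pvF inside row r (0 ≤ r ≤ s-1), column i (0 ≤ i ≤ s)
theorem pv_F_val (s r i : Int) (_hs : 2 ≤ s) (hr0 : 0 ≤ r) (_hr1 : r ≤ s - 1)
    (hi0 : 0 ≤ i) (hi1 : i ≤ s) :
    pvF s (r * (s + 1) + i)
      = (if i = s then '\n'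
         else if r = 0 ∨ r = s - 1 ∨ i = 0 ∨ i = s - 1 then '#' else ' ') := by
  obtain ⟨hd, hm⟩ := pv_fdm r i (s + 1) hr0 hi0 (by omega)
  simp only [pvF, hd, hm]

-- a full-width row of the flat map, as a List.range map
theorem pv_seg (s a L : Int) (_hL : 0 ≤ L) :
    (PySem.List.pyRange a (a + L) 1).map (pvF s)
      = (List.range L.toNat).map (fun (j : Nat) => pvF s (a + (j : Int))) := by
  rw [PySem.List.pyRange_one, List.map_map, show a + L - a = L from by ring]
  rfl

theorem pv_row_border (s r : Int) (hs : 2 ≤ s) (hr0 : 0 ≤ r) (hr1 : r ≤ s - 1)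
    (hr : r = 0 ∨ r = s - 1) :
    (List.range (s + 1).toNat).map (fun (j : Nat) => pvF s (r * (s + 1) + (j : Int)))
      = List.replicate s.toNat '#' ++ ['\n'] := by
  apply List.ext_getElem
  · simp; omega
  · intro j h1 h2
    simp only [List.getElem_map, List.getElem_range]
    have hj : j < (s + 1).toNat := by simpa using h1
    rw [pv_F_val s r (j : Int) hs hr0 hr1 (by positivity) (by omega)]
    by_cases hjs : (j : Int) = s
    · rw [if_pos hjs]
      rw [List.getElem_append_right (by simp; omega)]
      simp
    · rw [if_neg hjs, if_pos (by omega)]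
      rw [List.getElem_append_left (by simp; omega)]
      simp

theorem pv_row_last (s : Int) (hs : 2 ≤ s) :
    (List.range s.toNat).map (fun (j : Nat) => pvF s ((s - 1) * (s + 1) + (j : Int)))
      = List.replicate s.toNat '#' := by
  apply List.ext_getElem
  · simp
  · intro j h1 h2
    simp only [List.getElem_map, List.getElem_range, List.getElem_replicate]
    have hj : j < s.toNat := by simpa using h1
    rw [pv_F_val s (s - 1) (j : Int) hs (by omega) (by omega) (by positivity) (by omega)]
    rw [if_neg (by omega), if_pos (by omega)]

theorem pv_row_inner (s r : Int) (hs : 2 ≤ s) (hr0 : 1 ≤ r) (hr1 : r ≤ s - 2) :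
    (List.range (s + 1).toNat).map (fun (j : Nat) => pvF s (r * (s + 1) + (j : Int)))
      = '#' :: List.replicate (s - 2).toNat ' ' ++ ['#', '\n'] := by
  apply List.ext_getElem
  · simp; omega
  · intro j h1 h2
    simp only [List.getElem_map, List.getElem_range]
    have hj : j < (s + 1).toNat := by simpa using h1
    rw [pv_F_val s r (j : Int) hs (by omega) (by omega) (by positivity) (by omega)]
    rcases j with _ | n
    · -- j = 0
      rw [if_neg (by omega), if_pos (by omega)]
      rw [List.getElem_append_left (by simp)]
      rfl
    · by_cases hlt : n < (s - 2).toNat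
      · -- interior space
        rw [if_neg (by push_cast; omega), if_neg (by push_cast; omega)]
        rw [List.getElem_append_left (by simp; omega), List.getElem_cons_succ,
            List.getElem_replicate]
      · rw [List.getElem_append_right (by simp; omega)]
        simp only [List.length_cons, List.length_replicate]
        by_cases he : n = (s - 2).toNat
        · rw [if_neg (by push_cast; omega), if_pos (by push_cast; omega)]
          simp [he]
        · rw [if_pos (by push_cast; omega)]
          have hn : n = (s - 2).toNat + 1 := by omega
          simp [hn]

theorem pv_alt_eq_map (s : Int) (hs : 2 ≤ s) :
    create_square_alt s
      = String.ofList ((PySem.List.pyRange 0 (s * (s + 1) - 1) 1).map (pvF s)) := by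
  have hw : (0:Int) < s + 1 := by omega
  have hN : (0:Int) ≤ s * (s + 1) - 1 := by nlinarith
  unfold create_square_alt
  rw [if_neg (by omega)]
  simp only []
  congr 1
  have hflat : ∀ init : List Char,
      ((PySem.List.pyRange 1 (s - 1) 1).flatMap
          (fun r => PySem.List.pyRange (r * (s + 1) + 1) (r * (s + 1) + 1 + (s - 2)) 1)).foldl
        (fun b2 c => b2.set c.toNat ' ') init
      = (PySem.List.pyRange 1 (s - 1) 1).foldl
          (fun b r => (PySem.List.pyRange (r * (s + 1) + 1) (r * (s + 1) + 1 + (s - 2)) 1).foldl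
            (fun b2 c => b2.set c.toNat ' ') b) init :=
    fun init => List.foldl_flatMap
  rw [← hflat]
  apply List.ext_getElem?
  intro i
  rw [pv_foldl_set_getElem? (fun c => c.toNat) ' ',
      pv_foldl_set_getElem? (fun t => (s + t * (s + 1)).toNat) '\n',
      pv_foldl_set_length, List.length_replicate]
  by_cases hiN : i < (s * (s + 1) - 1).toNat
  · have hRHS : (List.map (pvF s) (PySem.List.pyRange 0 (s * (s + 1) - 1) 1))[i]?
        = some (pvF s (i : Int)) := by
      rw [List.getElem?_eq_getElem (by simp [PySem.List.length_pyRange_one]; omega)]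
      simp only [List.getElem_map, PySem.List.getElem_pyRange_one, zero_add]
    rw [hRHS]
    obtain ⟨d, hd⟩ : ∃ d, PySem.Int.floordiv (i : Int) (s + 1) = d := ⟨_, rfl⟩
    obtain ⟨m, hm⟩ : ∃ m, PySem.Int.mod (i : Int) (s + 1) = m := ⟨_, rfl⟩
    have hm0 : 0 ≤ m := hm ▸ PySem.Int.mod_nonneg _ hw
    have hm1 : m < s + 1 := hm ▸ PySem.Int.mod_lt _ hw
    have hdm : d * (s + 1) + m = (i : Int) := by
      rw [← hd, ← hm]; exact PySem.Int.floordiv_mul_add_mod _ _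
    have hi' : (i : Int) < s * (s + 1) - 1 := by omega
    have hi0 : (0:Int) ≤ (i : Int) := by positivity
    have hd0 : 0 ≤ d := by nlinarith
    have hd1 : d ≤ s - 1 := by nlinarith
    have hI :
        ((∃ x ∈ (PySem.List.pyRange 1 (s - 1) 1).flatMap
            (fun r => PySem.List.pyRange (r * (s + 1) + 1) (r * (s + 1) + 1 + (s - 2)) 1),
          x.toNat = i) ∧ i < (s * (s + 1) - 1).toNat)
        ↔ (1 ≤ d ∧ d ≤ s - 2 ∧ 1 ≤ m ∧ m ≤ s - 2) := by
      constructor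
      · rintro ⟨⟨x, hx, hxi⟩, -⟩
        rcases List.mem_flatMap.mp hx with ⟨r, hr, hxr⟩
        rw [PySem.List.mem_pyRange_one] at hr hxr
        have hx0 : (0:Int) ≤ x := by nlinarith
        have hxi' : x = (i : Int) := by omega
        obtain ⟨hdr, hmr⟩ := pv_fdm r (x - r * (s + 1)) (s + 1)
          (by omega) (by linarith) (by linarith)
        rw [show r * (s + 1) + (x - r * (s + 1)) = x from by ring, hxi', hd] at hdr
        rw [show r * (s + 1) + (x - r * (s + 1)) = x from by ring, hxi', hm] at hmr
        refine ⟨by omega, by omega, by linarith, by linarith⟩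
      · rintro ⟨h1d, h2d, h1m, h2m⟩
        refine ⟨⟨(i : Int), List.mem_flatMap.mpr ⟨d, ?_, ?_⟩, by omega⟩, hiN⟩
        · rw [PySem.List.mem_pyRange_one]; omega
        · rw [PySem.List.mem_pyRange_one]
          constructor <;> linarith
    have hS :
        ((∃ t ∈ PySem.List.pyRange 0 (s - 1) 1, (s + t * (s + 1)).toNat = i)
          ∧ i < (s * (s + 1) - 1).toNat) ↔ m = s := by
      constructor
      · rintro ⟨⟨t, ht, hti⟩, -⟩
        rw [PySem.List.mem_pyRange_one] at ht
        have h0 : (0:Int) ≤ s + t * (s + 1) := by nlinarith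
        have hx : s + t * (s + 1) = (i : Int) := by omega
        obtain ⟨-, hmr⟩ := pv_fdm t s (s + 1) (by omega) (by omega) (by omega)
        rw [show t * (s + 1) + s = s + t * (s + 1) from by ring, hx, hm] at hmr
        exact hmr
      · intro hms
        refine ⟨⟨d, ?_, by omega⟩, hiN⟩
        rw [PySem.List.mem_pyRange_one]
        refine ⟨hd0, by nlinarith⟩
    simp only [pvF, hd, hm]
    by_cases hms : m = s
    · rw [if_neg ((not_congr hI).mpr (by omega)), if_pos (hS.mpr hms), if_pos hms]
    · by_cases hb : d = 0 ∨ d = s - 1 ∨ m = 0 ∨ m = s - 1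
      · rw [if_neg ((not_congr hI).mpr (by omega)), if_neg ((not_congr hS).mpr hms),
            if_neg hms, if_pos hb]
        rw [List.getElem?_replicate]
        rw [if_pos hiN]
      · rw [if_pos (hI.mpr (by omega)), if_neg hms, if_neg hb]
  · rw [if_neg (fun h => hiN h.2), if_neg (fun h => hiN h.2)]
    rw [List.getElem?_eq_none (by simpa using hiN),
        List.getElem?_eq_none (by simp [PySem.List.length_pyRange_one]; omega)]

-- middle rows, by induction on the number of remaining rows
theorem pv_mid (s : Int) (hs : 2 ≤ s) :
    ∀ (t : Nat) (r : Int), 1 ≤ r → r + (t : Int) = s - 1 →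
    (PySem.List.pyRange (r * (s + 1)) ((s - 1) * (s + 1)) 1).map (pvF s)
      = (List.replicate t ('#' :: List.replicate (s - 2).toNat ' ' ++ ['#', '\n'])).flatten := by
  intro t
  induction t with
  | zero =>
      intro r hr1 hr2
      have : r = s - 1 := by omega
      simp [this, PySem.List.pyRange_one_eq_nil (le_refl _)]
  | succ k ih =>
      intro r hr1 hr2
      have hsplit : PySem.List.pyRange (r * (s + 1)) ((s - 1) * (s + 1)) 1
          = PySem.List.pyRange (r * (s + 1)) ((r + 1) * (s + 1)) 1
            ++ PySem.List.pyRange ((r + 1) * (s + 1)) ((s - 1) * (s + 1)) 1 := by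
        apply PySem.List.pyRange_one_append
        · nlinarith
        · have hr3 : r + 1 ≤ s - 1 := by push_cast at hr2; omega
          exact mul_le_mul_of_nonneg_right hr3 (by omega)
      rw [hsplit, List.map_append, ih (r + 1) (by omega) (by push_cast at hr2 ⊢; omega)]
      rw [show (r + 1) * (s + 1) = r * (s + 1) + (s + 1) from by ring]
      rw [pv_seg s _ _ (by omega), pv_row_inner s r hs hr1 (by omega)]
      simp [List.replicate_succ]

theorem pv_foldl_const (l : List Int) (row init : List Char) :
    l.foldl (fun acc _ => acc ++ row) init = init ++ (List.replicate l.length row).flatten := by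
  induction l generalizing init with
  | nil => simp
  | cons a t ih => simp [List.foldl_cons, ih, List.replicate_succ, List.append_assoc]

theorem create_square_eq (size : Int) : create_square size = create_square_alt size := by
  by_cases h1 : size < 1
  · simp [create_square, create_square_alt, h1]
  · by_cases h2 : size = 1
    · subst h2
      decide
    · have hs : 2 ≤ size := by omega
      rw [pv_alt_eq_map size hs]
      unfold create_square
      rw [if_neg h1, if_neg h2]
      simp only []
      rw [pv_foldl_const, PySem.List.length_pyRange_one,
          show size - 2 - 0 = size - 2 from by ring]
      -- split B's flat range into top row, middle rows, bottom row
      have hsplit1 : PySem.List.pyRange 0 (size * (size + 1) - 1) 1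
          = PySem.List.pyRange 0 (size + 1) 1
            ++ PySem.List.pyRange (size + 1) ((size - 1) * (size + 1)) 1
            ++ PySem.List.pyRange ((size - 1) * (size + 1)) (size * (size + 1) - 1) 1 := by
        rw [← PySem.List.pyRange_one_append 0 (size + 1) ((size - 1) * (size + 1)) (by omega) (by nlinarith)]
        exact PySem.List.pyRange_one_append 0 _ _ (by nlinarith) (by nlinarith)
      have htop : (PySem.List.pyRange 0 (size + 1) 1).map (pvF size)
          = List.replicate size.toNat '#' ++ ['\n'] := by
        have h := pv_seg size 0 (size + 1) (by omega)
        have hb := pv_row_border size 0 hs (le_refl 0) (by omega) (Or.inl rfl)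
        simp only [zero_add, zero_mul] at h hb
        rw [h, hb]
      have hmid := pv_mid size hs (size - 2).toNat 1 (le_refl 1) (by omega)
      rw [one_mul] at hmid
      have hbot : (PySem.List.pyRange ((size - 1) * (size + 1)) (size * (size + 1) - 1) 1).map (pvF size)
          = List.replicate size.toNat '#' := by
        have h := pv_seg size ((size - 1) * (size + 1)) size (by omega)
        rw [show (size - 1) * (size + 1) + size = size * (size + 1) - 1 from by ring] at h
        rw [h, pv_row_last size hs]
      rw [hsplit1, List.map_append, List.map_append, htop, hmid, hbot]

-- ===== VERDICT (by name: the statement is the Claim_ definition above) =====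
theorem create_square_spec : Claim_equal_create_square := by
  intro size _
  unfold Spec_create_square
  exact create_square_eq size
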